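-- pv_equiv track=rewrite | github.com/Sabeng/MOS-Song-Recognition-App | MOS_SONG RECOGNITION APP/server.py | match_fingerprints
-- ===== SOURCE A (Python) =====
-- from collections import defaultdict
--
-- def match_fingerprints(fp1, fp2):
--     hash_dict = defaultdict(list)
--     for h, t in fp1:
--         hash_dict[h].append(t)
--
--     matches = []
--     for h, t2 in fp2:
--         if h in hash_dict:
--             for t1 in hash_dict[h]:
--                 matches.append((t1, t2))
--
--     return matches
-- ===== SOURCE B (Python) =====
-- def match_fingerprints(fp1, fp2):
--     # No index: plain nested join, same output order as the dict version.
--     return [(t1, t2) for h, t2 in fp2 for h1, t1 in fp1 if h1 == h]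
-- ===== Notes on version B (the rewrite author's own statement) =====
-- stated objective: simpler
-- what changed: Replaced the defaultdict index plus two-phase lookup loop with a single nested-loop join (one comprehension) that scans fp1 for each fp2 entry; no dictionary is built.
import Mathlib
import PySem

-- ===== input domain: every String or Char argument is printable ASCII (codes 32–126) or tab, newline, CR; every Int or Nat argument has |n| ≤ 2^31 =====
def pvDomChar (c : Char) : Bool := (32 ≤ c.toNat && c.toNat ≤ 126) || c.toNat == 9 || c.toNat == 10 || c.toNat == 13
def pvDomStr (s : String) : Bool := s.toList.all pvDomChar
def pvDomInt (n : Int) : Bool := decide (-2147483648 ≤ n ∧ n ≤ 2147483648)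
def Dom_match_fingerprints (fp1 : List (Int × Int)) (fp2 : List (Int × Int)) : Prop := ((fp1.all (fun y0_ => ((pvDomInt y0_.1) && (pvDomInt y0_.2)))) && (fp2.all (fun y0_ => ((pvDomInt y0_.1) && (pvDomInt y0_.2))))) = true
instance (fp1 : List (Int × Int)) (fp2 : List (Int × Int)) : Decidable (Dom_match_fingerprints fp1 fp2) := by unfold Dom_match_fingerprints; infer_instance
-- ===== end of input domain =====

-- B drops A's defaultdict index and does a plain nested-loop join (simpler, no preprocessing; not faster).

-- ===== PORT A =====
-- hash_dict = defaultdict(list); for h, t in fp1: hash_dict[h].append(t)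
def pvBuildDict (fp1 : List (Int × Int)) : PySem.Dict Int (List Int) :=
  fp1.foldl (fun d p => d.modify p.1 [] (· ++ [p.2])) PySem.Dict.empty

def match_fingerprints (fp1 : List (Int × Int)) (fp2 : List (Int × Int)) : List (Int × Int) :=
  let hash_dict := pvBuildDict fp1
  -- for h, t2 in fp2: if h in hash_dict: for t1 in hash_dict[h]: acc_matches.append((t1, t2))
  fp2.foldl (fun acc_matches p =>
    if hash_dict.contains p.1 then
      (hash_dict.getD p.1 []).foldl (fun ms t1 => ms ++ [(t1, p.2)]) acc_matches
    else acc_matches) []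

-- ===== PORT B =====
def match_fingerprints_alt (fp1 : List (Int × Int)) (fp2 : List (Int × Int)) : List (Int × Int) :=
  fp2.flatMap (fun p2 => fp1.filterMap (fun p1 => if p1.1 == p2.1 then some (p1.2, p2.2) else none))

-- ===== PRECONDITION & SPEC =====
def Spec_match_fingerprints (fp1 : List (Int × Int)) (fp2 : List (Int × Int)) (out : List (Int × Int)) : Prop := out = match_fingerprints_alt fp1 fp2
instance (fp1 : List (Int × Int)) (fp2 : List (Int × Int)) (out : List (Int × Int)) : Decidable (Spec_match_fingerprints fp1 fp2 out) := by unfold Spec_match_fingerprints; infer_instance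

-- ===== CLAIM (what is proved, stated in full; the proofs are below) =====
def Claim_equal_match_fingerprints : Prop := ∀ (fp1 : List (Int × Int)) (fp2 : List (Int × Int)), Dom_match_fingerprints fp1 fp2 → Spec_match_fingerprints fp1 fp2 (match_fingerprints fp1 fp2)

-- ===== LEMMAS AND PROOFS =====

-- membership of a key in the built dict = some pair of fp1 has that hash
theorem contains_pvBuildDict (fp1 : List (Int × Int)) (c : Int) :
    ∀ d : PySem.Dict Int (List Int),
      (fp1.foldl (fun d p => d.modify p.1 [] (· ++ [p.2])) d).contains c
        = (d.contains c || fp1.any (fun p => p.1 == c)) := by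
  induction fp1 with
  | nil => simp
  | cons a l ih =>
      intro d
      simp only [List.foldl_cons, ih, PySem.Dict.contains_modify, List.any_cons]
      have hcb : (c == a.1) = (a.1 == c) := by simp [eq_comm]
      rw [hcb]
      cases a.1 == c <;> cases d.contains c <;> simp

-- the stored list for key c = the times of fp1 whose hash is c
theorem getD_pvBuildDict (fp1 : List (Int × Int)) (c : Int) :
    (pvBuildDict fp1).getD c [] = (fp1.filter (fun p => p.1 == c)).map (·.2) := by
  simpa using PySem.Dict.getD_foldl_modify_append fp1 PySem.Dict.empty c

-- B's inner scan over fp1 = mapping the stored list into pairs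
theorem inner_eq (fp1 : List (Int × Int)) (h t2 : Int) :
    fp1.filterMap (fun p1 => if p1.1 == h then some (p1.2, t2) else none)
      = (fp1.filter (fun p => p.1 == h)).map (fun p => (p.2, t2)) := by
  induction fp1 with
  | nil => rfl
  | cons a l ih =>
      simp only [beq_iff_eq] at ih ⊢
      by_cases hc : a.1 = h <;> simp [hc, ih]

theorem inner_foldl_append (l : List Int) (t2 : Int) :
    ∀ ms : List (Int × Int),
      l.foldl (fun ms t1 => ms ++ [(t1, t2)]) ms = ms ++ l.map (fun t1 => (t1, t2)) := by
  induction l with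
  | nil => simp
  | cons a l ih => intro ms; simp [ih, List.append_assoc]

theorem main_loop (fp1 : List (Int × Int)) (fp2 : List (Int × Int)) :
    ∀ acc : List (Int × Int),
      fp2.foldl (fun acc_matches p =>
        if (pvBuildDict fp1).contains p.1 then
          ((pvBuildDict fp1).getD p.1 []).foldl (fun ms t1 => ms ++ [(t1, p.2)]) acc_matches
        else acc_matches) acc
      = acc ++ fp2.flatMap (fun p2 => fp1.filterMap (fun p1 => if p1.1 == p2.1 then some (p1.2, p2.2) else none)) := by
  induction fp2 with
  | nil => simp
  | cons a l ih =>
      intro acc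
      have hstep :
          (if (pvBuildDict fp1).contains a.1 then
            ((pvBuildDict fp1).getD a.1 []).foldl (fun ms t1 => ms ++ [(t1, a.2)]) acc
          else acc)
          = acc ++ fp1.filterMap (fun p1 => if p1.1 == a.1 then some (p1.2, a.2) else none) := by
        rw [inner_eq]
        by_cases hc : (pvBuildDict fp1).contains a.1
        · rw [if_pos hc, inner_foldl_append, getD_pvBuildDict, List.map_map]
          rfl
        · rw [if_neg hc]
          have hany : fp1.any (fun p => p.1 == a.1) = false := by
            rw [Bool.eq_false_iff]
            intro htrue
            apply hc
            show (pvBuildDict fp1).contains a.1 = true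
            unfold pvBuildDict
            rw [contains_pvBuildDict]
            simp [htrue]
          have hfil : fp1.filter (fun p => p.1 == a.1) = [] := by
            rw [List.filter_eq_nil_iff]
            intro p hp
            have h3 := List.any_eq_false.mp hany p hp
            simpa using h3
          simp [hfil]
      simp only [List.foldl_cons, hstep, List.flatMap_cons, ih, List.append_assoc]

-- ===== VERDICT (by name: the statement is the Claim_ definition above) =====
theorem match_fingerprints_spec : Claim_equal_match_fingerprints := by
  intro fp1 fp2 _
  unfold Spec_match_fingerprints match_fingerprints match_fingerprints_alt
  simpa using main_loop fp1 fp2 []
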